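-- pv_equiv track=rewrite | github.com/gabozako/AlgoQueen | suy2on/Programmers/level2/pair_delete.py | solution
-- ===== SOURCE A (Python) =====
-- def solution(s):
--     stack = []
--     # 순서대로 제거
--     for char in s:
--         if stack and stack[-1] == char:
--             stack.pop()
--         else:
--             stack.append(char)
--
--     # 다 제거 됐으면 문자열길이로 성공여부결정
--
--     return int(len(stack) == 0)
-- ===== SOURCE B (Python) =====
-- def solution(s):
--     cur = s
--     changed = True
--     while changed:
--         changed = False
--         out = []
--         i = 0
--         n = len(cur)
--         while i < n:
--             if i + 1 < n and cur[i] == cur[i + 1]: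
--                 i += 2
--                 changed = True
--             else:
--                 out.append(cur[i])
--                 i += 1
--         cur = "".join(out)
--     return int(len(cur) == 0)
-- ===== Notes on version B (the rewrite author's own statement) =====
-- stated objective: alternative
-- what changed: Replaced the single-pass stack cancellation by a fixed-point reducer: each pass scans the string left to right removing adjacent equal pairs, and passes repeat until nothing changes.
import Mathlib
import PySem

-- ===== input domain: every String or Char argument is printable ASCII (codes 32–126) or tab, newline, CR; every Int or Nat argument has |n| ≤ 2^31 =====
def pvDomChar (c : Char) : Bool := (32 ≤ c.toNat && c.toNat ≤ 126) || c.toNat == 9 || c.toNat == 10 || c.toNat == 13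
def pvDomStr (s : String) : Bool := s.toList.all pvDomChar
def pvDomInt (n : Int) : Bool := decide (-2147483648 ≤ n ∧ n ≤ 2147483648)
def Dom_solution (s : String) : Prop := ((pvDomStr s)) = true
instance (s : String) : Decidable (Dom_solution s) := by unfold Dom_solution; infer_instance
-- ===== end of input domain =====

-- B replaces A's single-pass stack cancellation by repeated left-to-right pair-removal
-- passes iterated to a fixed point (alternative decomposition, same return value; not faster).


-- ===== PORT A =====
-- Python's stack appends/pops at the end; modelled with the top at the head.
def fstep (stack : List Char) (char : Char) : List Char :=
  match stack with
  | top :: rest => if top = char then rest else char :: top :: rest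
  | [] => [char]

def solution (s : String) : Int :=
  let stack := s.toList.foldl fstep []
  if stack.length = 0 then 1 else 0

-- ===== PORT B =====
-- one pass of B's inner while-loop: drops adjacent equal pairs; snd is the `changed` flag
def passOnce : List Char → List Char × Bool
  | a :: b :: t =>
      if a = b then ((passOnce t).1, true)
      else
        let p := passOnce (b :: t)
        (a :: p.1, p.2)
  | l => (l, false)

theorem passOnce_le (l : List Char) : (passOnce l).1.length ≤ l.length := by
  induction l using passOnce.induct with
  | case1 b t ih => simp [passOnce]; omega
  | case2 a b t h ih => simp [passOnce, h]; simp at ih; omega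
  | case3 l h =>
      cases l with
      | nil => simp [passOnce]
      | cons x xs => cases xs with
        | nil => simp [passOnce]
        | cons y ys => exact absurd rfl (h x y ys)

theorem passOnce_lt (l : List Char) (h : (passOnce l).2 = true) :
    (passOnce l).1.length < l.length := by
  induction l using passOnce.induct with
  | case1 b t ih =>
      have := passOnce_le t
      simp [passOnce]; omega
  | case2 a b t hne ih =>
      simp only [passOnce, if_neg hne] at h ⊢
      have := ih h
      simp at this ⊢; omega
  | case3 l h1 =>
      exfalso
      cases l with
      | nil => simp [passOnce] at h
      | cons x xs => cases xs with
        | nil => simp [passOnce] at h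
        | cons y ys => exact h1 x y ys rfl

-- the `while changed:` loop, iterated to a fixed point (passOnce_le/passOnce_lt justify termination)
def fixLoop (l : List Char) : List Char :=
  let p := passOnce l
  if hc : p.2 then fixLoop p.1 else p.1
termination_by l.length
decreasing_by exact passOnce_lt l hc

def solution_alt (s : String) : Int :=
  let cur := fixLoop s.toList
  if cur.length = 0 then 1 else 0


-- ===== PRECONDITION & SPEC =====
def Spec_solution (s : String) (out : Int) : Prop := out = solution_alt s
instance (s : String) (out : Int) : Decidable (Spec_solution s out) := by unfold Spec_solution; infer_instance

-- ===== CLAIM (what is proved, stated in full; the proofs are below) =====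
def Claim_equal_solution : Prop := ∀ (s : String), Dom_solution s → Spec_solution s (solution s)

-- ===== LEMMAS AND PROOFS =====
-- `red` is the canonical fully-cancelled word (built from the right); both ports compute it:
-- A's stack is (red l).reverse (invariant foldl_fstep_eq), B's fixed point is red l (fixLoop_eq_red).

def reducedB : List Char → Bool
  | a :: b :: t => !(a == b) && reducedB (b :: t)
  | _ => true

def rstep (a : Char) (x : List Char) : List Char :=
  match x with
  | b :: t => if a = b then t else a :: b :: t
  | [] => [a]

def red : List Char → List Char
  | [] => []
  | a :: t => rstep a (red t)

theorem reducedB_tail (a : Char) (x : List Char) (h : reducedB (a :: x) = true) :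
    reducedB x = true := by
  cases x with
  | nil => rfl
  | cons b t => simp [reducedB] at h; exact h.2

theorem reducedB_snoc (xs : List Char) (a : Char) :
    reducedB (xs ++ [a]) = (reducedB xs && xs.getLast?.all (fun b => !(b == a))) := by
  induction xs using reducedB.induct with
  | case1 x y t ih =>
      show (!(x == y) && reducedB ((y :: t) ++ [a])) = _
      rw [ih, List.getLast?_cons_cons]
      show _ = ((!(x == y) && reducedB (y :: t)) && _)
      rw [Bool.and_assoc]
  | case2 l h =>
      cases l with
      | nil => simp [reducedB]
      | cons x xs => cases xs with
        | nil => simp [reducedB]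
        | cons y ys => exact absurd rfl (h x y ys)

theorem reducedB_reverse (l : List Char) (h : reducedB l = true) :
    reducedB l.reverse = true := by
  induction l with
  | nil => rfl
  | cons a t ih =>
      rw [List.reverse_cons, reducedB_snoc, ih (reducedB_tail a t h), List.getLast?_reverse]
      cases t with
      | nil => rfl
      | cons b t' => simp [reducedB] at h ⊢; simpa using fun e => h.1 e.symm

theorem rstep_reduced (a : Char) (x : List Char) (h : reducedB x = true) :
    reducedB (rstep a x) = true := by
  cases x with
  | nil => rfl
  | cons b t =>
      by_cases hab : a = b
      · simp only [rstep, if_pos hab]; exact reducedB_tail b t h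
      · simp only [rstep, if_neg hab]; simp [reducedB, hab, h]

theorem red_reduced (l : List Char) : reducedB (red l) = true := by
  induction l with
  | nil => rfl
  | cons a t ih => exact rstep_reduced a (red t) ih

theorem red_of_reduced (l : List Char) (h : reducedB l = true) : red l = l := by
  induction l with
  | nil => rfl
  | cons a t ih =>
      have ht : red t = t := ih (reducedB_tail a t h)
      simp only [red, ht]
      cases t with
      | nil => rfl
      | cons b t' =>
          have hab : ¬ a = b := by simp [reducedB] at h; exact fun e => h.1 e
          simp [rstep, hab]

theorem rstep_rstep (a : Char) (x : List Char) (h : reducedB x = true) :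
    rstep a (rstep a x) = x := by
  cases x with
  | nil => simp [rstep]
  | cons b t =>
      by_cases hab : a = b
      · subst hab
        simp only [rstep, if_pos rfl]
        cases t with
        | nil => rfl
        | cons c t' =>
            have hbc : ¬ a = c := by simp [reducedB] at h; exact fun e => h.1 e
            simp [rstep, hbc]
      · simp [rstep, hab]

theorem fstep_reduced (st : List Char) (a : Char) (h : reducedB st = true) :
    reducedB (fstep st a) = true := by
  cases st with
  | nil => rfl
  | cons top rest =>
      by_cases hta : top = a
      · simp only [fstep, if_pos hta]; exact reducedB_tail top rest h
      · simp only [fstep, if_neg hta]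
        simp [reducedB, h]
        exact fun e => hta e.symm

theorem foldr_rstep_nil (u : List Char) : List.foldr rstep ([] : List Char) u = red u := by
  induction u with
  | nil => rfl
  | cons a t ih => simp [red, List.foldr, ih]

theorem foldl_fstep_eq (l : List Char) : ∀ (st : List Char), reducedB st = true →
    List.foldl fstep st l = (List.foldr rstep (red l) st.reverse).reverse := by
  induction l with
  | nil =>
      intro st h
      show st = (List.foldr rstep (red []) st.reverse).reverse
      rw [show red [] = ([]:List Char) from rfl, foldr_rstep_nil,
          red_of_reduced _ (reducedB_reverse st h), List.reverse_reverse]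
  | cons a l ih =>
      intro st h
      have hred := red_reduced l
      have step : List.foldr rstep (red l) (fstep st a).reverse
          = List.foldr rstep (rstep a (red l)) st.reverse := by
        cases st with
        | nil => rfl
        | cons top rest =>
            by_cases hta : top = a
            · subst hta
              rw [show fstep (top :: rest) top = rest from by simp [fstep]]
              rw [List.reverse_cons, List.foldr_append]
              show List.foldr rstep (red l) rest.reverse
                  = List.foldr rstep (rstep top (rstep top (red l))) rest.reverse
              rw [rstep_rstep _ _ hred]
            · rw [show fstep (top :: rest) a = a :: top :: rest from by simp [fstep, hta]]
              simp [List.foldr_append]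
      calc List.foldl fstep st (a :: l) = List.foldl fstep (fstep st a) l := rfl
        _ = (List.foldr rstep (red l) (fstep st a).reverse).reverse := ih _ (fstep_reduced st a h)
        _ = (List.foldr rstep (rstep a (red l)) st.reverse).reverse := by rw [step]
        _ = (List.foldr rstep (red (a :: l)) st.reverse).reverse := rfl

theorem stack_eq_red_reverse (l : List Char) :
    List.foldl fstep [] l = (red l).reverse := by
  have := foldl_fstep_eq l [] rfl
  simpa [foldr_rstep_nil] using this

theorem passOnce_unchanged (l : List Char) (h : (passOnce l).2 = false) :
    (passOnce l).1 = l ∧ reducedB l = true := by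
  induction l using passOnce.induct with
  | case1 b t ih => simp [passOnce] at h
  | case2 a b t hne ih =>
      simp only [passOnce, if_neg hne] at h ⊢
      obtain ⟨h1, h2⟩ := ih h
      refine ⟨by simp [h1], ?_⟩
      simp [reducedB, hne, h2]
  | case3 l h1 =>
      cases l with
      | nil => exact ⟨rfl, rfl⟩
      | cons x xs => cases xs with
        | nil => exact ⟨rfl, rfl⟩
        | cons y ys => exact absurd rfl (h1 x y ys)

theorem red_passOnce (l : List Char) : red (passOnce l).1 = red l := by
  induction l using passOnce.induct with
  | case1 b t ih =>
      rw [show (passOnce (b :: b :: t)).1 = (passOnce t).1 from by simp [passOnce]]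
      rw [ih]
      show red t = rstep b (rstep b (red t))
      rw [rstep_rstep b (red t) (red_reduced t)]
  | case2 a b t hne ih =>
      simp only [passOnce, if_neg hne]
      show rstep a (red (passOnce (b :: t)).1) = rstep a (red (b :: t))
      rw [ih]
  | case3 l h1 =>
      cases l with
      | nil => rfl
      | cons x xs => cases xs with
        | nil => rfl
        | cons y ys => exact absurd rfl (h1 x y ys)

theorem fixLoop_eq_red (l : List Char) : fixLoop l = red l := by
  induction l using fixLoop.induct with
  | case1 l p hc ih =>
      rw [fixLoop]
      show (if hc : (passOnce l).2 then fixLoop (passOnce l).1 else (passOnce l).1) = red l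
      rw [dif_pos hc]
      rw [ih, red_passOnce]
  | case2 l p hc =>
      rw [fixLoop]
      show (if hc : (passOnce l).2 then fixLoop (passOnce l).1 else (passOnce l).1) = red l
      rw [dif_neg hc]
      obtain ⟨h1, h2⟩ := passOnce_unchanged l (by simpa using hc)
      rw [h1, red_of_reduced l h2]


-- ===== VERDICT (by name: the statement is the Claim_ definition above) =====
theorem solution_spec : Claim_equal_solution := by
  intro s _
  unfold Spec_solution solution solution_alt
  rw [stack_eq_red_reverse, fixLoop_eq_red]
  simp
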